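-- pv_equiv track=rewrite | github.com/alexbirnberg/pack-o-mat | results/match.py | have_same_suffix
-- ===== SOURCE A (Python) =====
-- def have_same_suffix(s1, s2):
--     min_len = min(len(s1), len(s2))
--
--     # Compare character by character from the end
--     suffix = ""
--     for i in range(1, min_len + 1):  # We use 1-based index to check from the end
--         if s1[-i] == s2[-i]:
--             suffix = s1[-i] + suffix  # Add to the suffix if they are the same
--         else:
--             break  # Stop when characters no longer match
--     return len(suffix) > 0 and suffix != s1 and suffix != s2
-- ===== SOURCE B (Python) =====
-- def have_same_suffix(s1, s2):
--     # Loop-free: a nontrivial proper common suffix exists iff the last characters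
--     # agree and neither string is a suffix of the other.
--     if not s1 or not s2 or s1[-1] != s2[-1]:
--         return False
--     return not s1.endswith(s2) and not s2.endswith(s1)
-- ===== Notes on version B (the rewrite author's own statement) =====
-- stated objective: faster
-- what changed: B replaces A's reverse character-by-character loop that builds the suffix string by string prepends with a loop-free characterization: the last characters agree and neither string is a suffix of the other (two endswith tests).
import Mathlib
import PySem

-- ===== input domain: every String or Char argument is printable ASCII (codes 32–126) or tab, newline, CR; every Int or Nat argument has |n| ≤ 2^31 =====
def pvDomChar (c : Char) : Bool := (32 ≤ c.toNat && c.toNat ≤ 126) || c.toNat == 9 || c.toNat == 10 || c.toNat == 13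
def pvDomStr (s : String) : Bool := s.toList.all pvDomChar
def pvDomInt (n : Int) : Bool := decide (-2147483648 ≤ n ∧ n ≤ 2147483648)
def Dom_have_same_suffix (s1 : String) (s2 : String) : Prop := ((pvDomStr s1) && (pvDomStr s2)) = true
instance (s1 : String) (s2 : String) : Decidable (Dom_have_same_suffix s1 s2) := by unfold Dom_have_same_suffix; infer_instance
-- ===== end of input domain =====

-- B is loop-free: the result holds iff the last characters agree and neither string is a
-- suffix of the other (two endswith tests), instead of A's reverse loop that builds the
-- common suffix string by repeated prepends (objective: faster).

-- ===== PORT A =====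
-- The for-loop 'for i in range(1, min_len+1)' with break, as recursion on the remaining
-- iteration count (fuel); i is the Python loop variable. The '_, _' match arm is the
-- IndexError case of s[-i], unreachable since 1 ≤ i ≤ min_len keeps both in range.
def pvALoopA (s1 s2 : String) (i : Int) (fuel : Nat) (suffix : List Char) : List Char :=
  match fuel with
  | 0 => suffix
  | f + 1 =>
    match PySem.Str.pyGet? s1 (-i), PySem.Str.pyGet? s2 (-i) with
    | some c1, some c2 =>
        if c1 = c2 then pvALoopA s1 s2 (i + 1) f (c1 :: suffix)
        else suffix
    | _, _ => suffix

def have_same_suffix (s1 : String) (s2 : String) : Bool :=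
  let minLen := min s1.toList.length s2.toList.length
  let suffix := pvALoopA s1 s2 1 minLen []
  decide (0 < suffix.length) && decide (suffix ≠ s1.toList) && decide (suffix ≠ s2.toList)

-- ===== PORT B =====
-- 'if not s1 or not s2 or s1[-1] != s2[-1]: return False' — the none arm of s[-1] is the
-- empty string; then 'not s1.endswith(s2) and not s2.endswith(s1)'.
def have_same_suffix_alt (s1 : String) (s2 : String) : Bool :=
  match PySem.Str.pyGet? s1 (-1), PySem.Str.pyGet? s2 (-1) with
  | some c1, some c2 =>
      if c1 ≠ c2 then false
      else !(PySem.Str.endswith s1 s2) && !(PySem.Str.endswith s2 s1)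
  | _, _ => false

-- ===== PRECONDITION & SPEC =====
def Spec_have_same_suffix (s1 : String) (s2 : String) (out : Bool) : Prop := out = have_same_suffix_alt s1 s2
instance (s1 : String) (s2 : String) (out : Bool) : Decidable (Spec_have_same_suffix s1 s2 out) := by unfold Spec_have_same_suffix; infer_instance

-- ===== CLAIM =====
def Claim_equal_have_same_suffix : Prop := ∀ (s1 : String) (s2 : String), Dom_have_same_suffix s1 s2 → Spec_have_same_suffix s1 s2 (have_same_suffix s1 s2)

-- ===== LEMMAS AND PROOFS =====

-- Length of the common prefix of two lists (proof-side measure; k applied to the reversed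
-- character lists is the length of the common suffix both programs decide about).
def pvCommonLen : List Char → List Char → Nat
  | a :: as, b :: bs => if a = b then pvCommonLen as bs + 1 else 0
  | _, _ => 0

lemma pvCommonLen_le_left : ∀ l1 l2 : List Char, pvCommonLen l1 l2 ≤ l1.length := by
  intro l1
  induction l1 with
  | nil => intro l2; cases l2 <;> simp [pvCommonLen]
  | cons a as ih =>
    intro l2
    cases l2 with
    | nil => simp [pvCommonLen]
    | cons b bs =>
      simp only [pvCommonLen, List.length_cons]
      split
      · exact Nat.succ_le_succ (ih bs)
      · exact Nat.zero_le _

lemma pvCommonLen_le_right : ∀ l1 l2 : List Char, pvCommonLen l1 l2 ≤ l2.length := by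
  intro l1
  induction l1 with
  | nil => intro l2; cases l2 <;> simp [pvCommonLen]
  | cons a as ih =>
    intro l2
    cases l2 with
    | nil => simp [pvCommonLen]
    | cons b bs =>
      simp only [pvCommonLen, List.length_cons]
      split
      · exact Nat.succ_le_succ (ih bs)
      · exact Nat.zero_le _

lemma pvCommonLen_comm : ∀ l1 l2 : List Char, pvCommonLen l1 l2 = pvCommonLen l2 l1 := by
  intro l1
  induction l1 with
  | nil => intro l2; cases l2 <;> simp [pvCommonLen]
  | cons a as ih =>
    intro l2
    cases l2 with
    | nil => simp [pvCommonLen]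
    | cons b bs =>
      simp only [pvCommonLen]
      by_cases h : a = b
      · subst h; simp [ih bs]
      · rw [if_neg h, if_neg (Ne.symm h)]

-- The common-prefix length reaches |l2| exactly when l2 is a prefix of l1.
lemma pvCommonLen_eq_right_iff : ∀ l1 l2 : List Char, pvCommonLen l1 l2 = l2.length ↔ l2 <+: l1 := by
  intro l1
  induction l1 with
  | nil =>
    intro l2
    cases l2 with
    | nil => simp [pvCommonLen]
    | cons b bs => simp [pvCommonLen]
  | cons a as ih =>
    intro l2
    cases l2 with
    | nil => simp [pvCommonLen]
    | cons b bs =>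
      simp only [pvCommonLen, List.length_cons]
      by_cases h : a = b
      · subst h
        rw [if_pos rfl, List.cons_prefix_cons]
        simp only [true_and]
        constructor
        · intro hlen; exact (ih bs).mp (by omega)
        · intro hpre; have := (ih bs).mpr hpre; omega
      · rw [if_neg h]
        simp only [List.cons_prefix_cons]
        constructor
        · omega
        · rintro ⟨hba, -⟩; exact absurd hba.symm h

lemma pvCommonLen_take_eq : ∀ l1 l2 : List Char,
    l1.take (pvCommonLen l1 l2) = l2.take (pvCommonLen l1 l2) := by
  intro l1
  induction l1 with
  | nil => intro l2; cases l2 <;> simp [pvCommonLen]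
  | cons a as ih =>
    intro l2
    cases l2 with
    | nil => simp [pvCommonLen]
    | cons b bs =>
      simp only [pvCommonLen]
      split
      · next h => simp [List.take_succ_cons, h, ih bs]
      · simp

-- s[-(j+1)] is the j-th character of the reversed character list.
lemma pvGet_neg_rev (s : String) (j : Nat) (hj : j < s.toList.length) :
    PySem.Str.pyGet? s (-((j : Int) + 1)) = s.toList.reverse[j]? := by
  have h1 : -((j : Int) + 1) = -(((j + 1 : Nat) : Int)) := by push_cast; ring
  rw [h1]
  have h2 : PySem.List.pyGet? s.toList (-(((j + 1 : Nat) : Int))) =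
      s.toList[s.toList.length - (j + 1)]? :=
    PySem.List.pyGet?_neg_natCast _ _ (Nat.succ_pos j) (by omega)
  have h3 : PySem.Str.pyGet? s (-(((j + 1 : Nat) : Int))) =
      PySem.List.pyGet? s.toList (-(((j + 1 : Nat) : Int))) := by
    simp [PySem.Str.pyGet?]
  rw [h3, h2]
  rw [List.getElem?_reverse (by simpa using hj)]
  congr 1
  omega

-- Loop invariant: at iteration i = j+1 with fuel + j = min_len, the loop returns the
-- reversed common prefix of the reversed tails, prepended to the accumulator.
lemma pvALoopA_spec (s1 s2 : String) : ∀ (f j : Nat) (suffix : List Char),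
    f + j = min s1.toList.length s2.toList.length →
    pvALoopA s1 s2 ((j : Int) + 1) f suffix =
      ((s1.toList.reverse.drop j).take
        (pvCommonLen (s1.toList.reverse.drop j) (s2.toList.reverse.drop j))).reverse ++ suffix := by
  intro f
  induction f with
  | zero =>
    intro j suffix hj
    have : s1.toList.reverse.drop j = [] ∨ s2.toList.reverse.drop j = [] := by
      rcases le_total s1.toList.length s2.toList.length with h | h
      · left; apply List.drop_eq_nil_of_le; rw [List.length_reverse]; omega
      · right; apply List.drop_eq_nil_of_le; rw [List.length_reverse]; omega
    rcases this with h | h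
    · simp [pvALoopA, h, pvCommonLen]
    · rw [h]
      cases s1.toList.reverse.drop j <;> simp [pvALoopA, pvCommonLen]
  | succ f ih =>
    intro j suffix hj
    have hj1 : j < s1.toList.length := by omega
    have hj2 : j < s2.toList.length := by omega
    have hr1 : j < s1.toList.reverse.length := by simpa using hj1
    have hr2 : j < s2.toList.reverse.length := by simpa using hj2
    have hg1 : PySem.Str.pyGet? s1 (-((j : Int) + 1)) = some s1.toList.reverse[j] := by
      rw [pvGet_neg_rev s1 j hj1]; exact List.getElem?_eq_getElem hr1
    have hg2 : PySem.Str.pyGet? s2 (-((j : Int) + 1)) = some s2.toList.reverse[j] := by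
      rw [pvGet_neg_rev s2 j hj2]; exact List.getElem?_eq_getElem hr2
    have hd1 : s1.toList.reverse.drop j = s1.toList.reverse[j] :: s1.toList.reverse.drop (j + 1) :=
      List.drop_eq_getElem_cons hr1
    have hd2 : s2.toList.reverse.drop j = s2.toList.reverse[j] :: s2.toList.reverse.drop (j + 1) :=
      List.drop_eq_getElem_cons hr2
    rw [show pvALoopA s1 s2 ((j : Int) + 1) (f + 1) suffix =
        (match PySem.Str.pyGet? s1 (-((j : Int) + 1)), PySem.Str.pyGet? s2 (-((j : Int) + 1)) with
        | some c1, some c2 =>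
            if c1 = c2 then pvALoopA s1 s2 (((j : Int) + 1) + 1) f (c1 :: suffix)
            else suffix
        | _, _ => suffix) from rfl]
    rw [hg1, hg2]
    dsimp only
    by_cases hc : s1.toList.reverse[j] = s2.toList.reverse[j]
    · rw [if_pos hc]
      have hstep : ((j : Int) + 1) + 1 = (((j + 1 : Nat) : Int)) + 1 := by push_cast; ring
      rw [hstep, ih (j + 1) _ (by omega), hd1, hd2, ← hc]
      simp [pvCommonLen]
    · rw [if_neg hc, hd1, hd2]
      simp only [pvCommonLen]
      rw [if_neg hc]
      simp

-- A computes exactly the three comparisons of k with 0 and the two lengths.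
lemma have_same_suffix_eq_k (s1 s2 : String) :
    have_same_suffix s1 s2 =
      (decide (0 < pvCommonLen s1.toList.reverse s2.toList.reverse) &&
       decide (pvCommonLen s1.toList.reverse s2.toList.reverse < s1.toList.length) &&
       decide (pvCommonLen s1.toList.reverse s2.toList.reverse < s2.toList.length)) := by
  unfold have_same_suffix
  dsimp only
  set k := pvCommonLen s1.toList.reverse s2.toList.reverse with hk
  have hmain := pvALoopA_spec s1 s2 (min s1.toList.length s2.toList.length) 0 [] (by omega)
  simp only [Nat.cast_zero, zero_add, List.drop_zero, List.append_nil] at hmain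
  have hk1 : k ≤ s1.toList.length := by
    have := pvCommonLen_le_left s1.toList.reverse s2.toList.reverse
    simpa using this
  have hk2 : k ≤ s2.toList.length := by
    have := pvCommonLen_le_right s1.toList.reverse s2.toList.reverse
    simpa using this
  set L := pvALoopA s1 s2 1 (min s1.toList.length s2.toList.length) [] with hL
  have hLval : L = (s1.toList.reverse.take k).reverse := hmain
  have hLlen : L.length = k := by
    rw [hLval, List.length_reverse, List.length_take, List.length_reverse]; omega
  have h1 : (L ≠ s1.toList) ↔ k < s1.toList.length := by
    constructor
    · intro hne
      rcases Nat.lt_or_ge k s1.toList.length with h | h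
      · exact h
      · exfalso
        apply hne
        have hkeq : k = s1.toList.length := le_antisymm hk1 h
        rw [hLval, hkeq, List.take_of_length_le (by simp)]
        simp
    · intro hlt hne
      have := congrArg List.length hne
      rw [hLlen] at this
      omega
  have h2 : (L ≠ s2.toList) ↔ k < s2.toList.length := by
    constructor
    · intro hne
      rcases Nat.lt_or_ge k s2.toList.length with h | h
      · exact h
      · exfalso
        apply hne
        have hkeq : k = s2.toList.length := le_antisymm hk2 h
        rw [hLval, pvCommonLen_take_eq s1.toList.reverse s2.toList.reverse, ← hk, hkeq,
          List.take_of_length_le (by simp)]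
        simp
    · intro hlt hne
      have := congrArg List.length hne
      rw [hLlen] at this
      omega
  have e0 : decide (0 < L.length) = decide (0 < k) := by rw [hLlen]
  have e1 : decide (L ≠ s1.toList) = decide (k < s1.toList.length) := decide_eq_decide.mpr h1
  have e2 : decide (L ≠ s2.toList) = decide (k < s2.toList.length) := decide_eq_decide.mpr h2
  rw [e0, e1, e2]

theorem have_same_suffix_spec : Claim_equal_have_same_suffix := by
  unfold Claim_equal_have_same_suffix
  intro s1 s2 _
  unfold Spec_have_same_suffix
  rw [have_same_suffix_eq_k]
  unfold have_same_suffix_alt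
  set k := pvCommonLen s1.toList.reverse s2.toList.reverse with hk
  have hk1 : k ≤ s1.toList.length := by
    have := pvCommonLen_le_left s1.toList.reverse s2.toList.reverse
    simpa using this
  have hk2 : k ≤ s2.toList.length := by
    have := pvCommonLen_le_right s1.toList.reverse s2.toList.reverse
    simpa using this
  -- the two endswith tests, as comparisons of k with the lengths
  have hes1 : PySem.Str.endswith s1 s2 = true ↔ k = s2.toList.length := by
    rw [PySem.Str.endswith_eq, PySem.Chars.endswith_iff, ← List.reverse_prefix,
      ← pvCommonLen_eq_right_iff s1.toList.reverse s2.toList.reverse, ← hk,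
      List.length_reverse]
  have hes2 : PySem.Str.endswith s2 s1 = true ↔ k = s1.toList.length := by
    rw [PySem.Str.endswith_eq, PySem.Chars.endswith_iff, ← List.reverse_prefix,
      ← pvCommonLen_eq_right_iff s2.toList.reverse s1.toList.reverse,
      ← pvCommonLen_comm, ← hk, List.length_reverse]
  cases hg1 : PySem.Str.pyGet? s1 (-1) with
  | none =>
    -- s1 empty, so k = 0 and both sides are false
    have hs1 : s1.toList = [] := by
      by_contra hne
      have hlen : 0 < s1.toList.length := List.length_pos_iff.mpr hne
      have := pvGet_neg_rev s1 0 hlen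
      simp only [Nat.cast_zero, zero_add] at this
      rw [this] at hg1
      rw [List.getElem?_eq_getElem (by simpa using hlen)] at hg1
      simp at hg1
    have hk0 : k = 0 := by rw [hk, hs1]; cases s2.toList.reverse <;> simp [pvCommonLen]
    simp [hk0]
  | some c1 =>
    cases hg2 : PySem.Str.pyGet? s2 (-1) with
    | none =>
      have hs2 : s2.toList = [] := by
        by_contra hne
        have hlen : 0 < s2.toList.length := List.length_pos_iff.mpr hne
        have := pvGet_neg_rev s2 0 hlen
        simp only [Nat.cast_zero, zero_add] at this
        rw [this] at hg2
        rw [List.getElem?_eq_getElem (by simpa using hlen)] at hg2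
        simp at hg2
      have hk0 : k = 0 := by rw [hk, hs2]; cases s1.toList.reverse <;> simp [pvCommonLen]
      simp [hk0]
    | some c2 =>
      dsimp only
      -- both strings nonempty; c1, c2 are the heads of the reversed lists
      have hl1 : 0 < s1.toList.length := by
        by_contra h
        have hnil : s1.toList = [] := List.length_eq_zero_iff.mp (by omega)
        simp [hnil, PySem.List.pyGet?] at hg1
      have hl2 : 0 < s2.toList.length := by
        by_contra h
        have hnil : s2.toList = [] := List.length_eq_zero_iff.mp (by omega)
        simp [hnil, PySem.List.pyGet?] at hg2
      have hc1 : s1.toList.reverse[0]? = some c1 := by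
        rw [show ((-1 : Int)) = -(((0:Nat) : Int) + 1) by norm_num] at hg1
        rw [pvGet_neg_rev s1 0 hl1] at hg1; exact hg1
      have hc2 : s2.toList.reverse[0]? = some c2 := by
        rw [show ((-1 : Int)) = -(((0:Nat) : Int) + 1) by norm_num] at hg2
        rw [pvGet_neg_rev s2 0 hl2] at hg2; exact hg2
      obtain ⟨as, has⟩ : ∃ as, s1.toList.reverse = c1 :: as := by
        cases h : s1.toList.reverse with
        | nil => rw [h] at hc1; simp at hc1
        | cons x xs => rw [h] at hc1; simp at hc1; exact ⟨xs, by rw [hc1]⟩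
      obtain ⟨bs, hbs⟩ : ∃ bs, s2.toList.reverse = c2 :: bs := by
        cases h : s2.toList.reverse with
        | nil => rw [h] at hc2; simp at hc2
        | cons x xs => rw [h] at hc2; simp at hc2; exact ⟨xs, by rw [hc2]⟩
      by_cases hc : c1 = c2
      · -- matching last characters: k > 0; both sides reduce to the two length tests
        rw [if_neg (by simpa using hc)]
        have hkpos : 0 < k := by
          rw [hk, has, hbs, hc]; simp [pvCommonLen]
        have he1 : (!PySem.Str.endswith s1 s2) = decide (k < s2.toList.length) := by
          by_cases h : k < s2.toList.length
          · have hne : PySem.Str.endswith s1 s2 = false := by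
              cases hE : PySem.Str.endswith s1 s2
              · rfl
              · exact absurd (hes1.mp hE) (by omega)
            rw [hne, decide_eq_true h]; rfl
          · have hE : PySem.Str.endswith s1 s2 = true := hes1.mpr (by omega)
            rw [hE, decide_eq_false h]; rfl
        have he2 : (!PySem.Str.endswith s2 s1) = decide (k < s1.toList.length) := by
          by_cases h : k < s1.toList.length
          · have hne : PySem.Str.endswith s2 s1 = false := by
              cases hE : PySem.Str.endswith s2 s1
              · rfl
              · exact absurd (hes2.mp hE) (by omega)
            rw [hne, decide_eq_true h]; rfl
          · have hE : PySem.Str.endswith s2 s1 = true := hes2.mpr (by omega)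
            rw [hE, decide_eq_false h]; rfl
        rw [he1, he2]
        simp only [hkpos, decide_true, Bool.true_and]
        rw [Bool.and_comm]
      · -- mismatching last characters: k = 0; both sides false
        rw [if_pos (by simpa using hc)]
        have hk0 : k = 0 := by rw [hk, has, hbs]; simp [pvCommonLen, hc]
        simp [hk0]
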